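-- pv_equiv track=rewrite | github.com/BuiVannn/Python---PTIT | py01066.py | check
-- ===== SOURCE A (Python) =====
-- def check(s):
--     s1 = s[::-1]
--     for i in range(1, len(s)):
--         n = abs(ord(s[i]) - ord(s[i - 1]))
--         m = abs(ord(s1[i]) - ord(s1[i - 1]))
--         if n != m:
--             return 0
--     return 1
-- ===== SOURCE B (Python) =====
-- def check(s):
--     # Two-pointer scan converging from both ends of the original string:
--     # compare the boundary adjacent differences and move inward; no reversed copy.
--     i, j = 0, len(s) - 1
--     while i + 1 < j:
--         if abs(ord(s[i + 1]) - ord(s[i])) != abs(ord(s[j]) - ord(s[j - 1])):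
--             return 0
--         i += 1
--         j -= 1
--     return 1
-- ===== Notes on version B (the rewrite author's own statement) =====
-- stated objective: alternative
-- what changed: B replaces A's full forward scan against a materialized reversed copy of the string by a two-pointer loop that converges from both ends of the original string, comparing the two boundary adjacent differences at each step and building no reversed string.
import Mathlib
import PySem

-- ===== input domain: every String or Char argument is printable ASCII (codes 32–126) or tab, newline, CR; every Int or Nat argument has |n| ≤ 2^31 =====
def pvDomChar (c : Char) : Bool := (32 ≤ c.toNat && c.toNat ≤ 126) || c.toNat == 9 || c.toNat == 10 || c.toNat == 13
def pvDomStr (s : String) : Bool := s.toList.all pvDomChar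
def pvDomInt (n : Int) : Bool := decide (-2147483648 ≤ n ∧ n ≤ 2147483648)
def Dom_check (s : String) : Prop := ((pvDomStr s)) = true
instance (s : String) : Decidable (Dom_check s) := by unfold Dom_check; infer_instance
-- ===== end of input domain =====

-- B replaces A's forward scan against a materialized reversed copy of the string by a
-- two-pointer loop converging from both ends of the original string (objective: alternative).

-- ===== PORT A =====
-- A's for-loop with early return, over the remaining index list
def checkLoopA (cs cs1 : List Char) : List Int → Int
  | [] => 1
  | i :: rest =>
    let n : Int := |((PySem.List.pyGetD cs i ' ').toNat : Int) - ((PySem.List.pyGetD cs (i - 1) ' ').toNat : Int)|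
    let m : Int := |((PySem.List.pyGetD cs1 i ' ').toNat : Int) - ((PySem.List.pyGetD cs1 (i - 1) ' ').toNat : Int)|
    if n ≠ m then 0 else checkLoopA cs cs1 rest

def check (s : String) : Int :=
  let cs := s.toList
  let cs1 := (PySem.List.slice? cs none none (-1)).getD []   -- s1 = s[::-1]
  checkLoopA cs cs1 (PySem.List.pyRange 1 (cs.length : Int) 1)

-- ===== PORT B =====
-- B's while-loop: i walks right from 0, j walks left from len(s)-1
def checkLoopB (cs : List Char) (i j : Int) : Int :=
  if _h : i + 1 < j then
    let n : Int := |((PySem.List.pyGetD cs (i + 1) ' ').toNat : Int) - ((PySem.List.pyGetD cs i ' ').toNat : Int)|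
    let m : Int := |((PySem.List.pyGetD cs j ' ').toNat : Int) - ((PySem.List.pyGetD cs (j - 1) ' ').toNat : Int)|
    if n ≠ m then 0 else checkLoopB cs (i + 1) (j - 1)
  else 1
termination_by (j - i).toNat
decreasing_by simp; omega

def check_alt (s : String) : Int :=
  checkLoopB s.toList 0 ((s.toList.length : Int) - 1)

-- ===== PRECONDITION & SPEC =====
def Spec_check (s : String) (out : Int) : Prop := out = check_alt s
instance (s : String) (out : Int) : Decidable (Spec_check s out) := by unfold Spec_check; infer_instance

-- ===== CLAIM (what is proved, stated in full; the proofs are below) =====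
def Claim_equal_check : Prop := ∀ (s : String), Dom_check s → Spec_check s (check s)

-- ===== LEMMAS AND PROOFS =====

def pvDiffs (l : List Char) : List Int :=
  List.zipWith (fun a b : Char => |((b.toNat : Int)) - ((a.toNat : Int))|) l l.tail

lemma pvDiffs_length (l : List Char) : (pvDiffs l).length = l.length - 1 := by
  simp [pvDiffs]

lemma pvDiffs_getElem (l : List Char) (k : Nat) (hk : k < (pvDiffs l).length) :
    (pvDiffs l)[k] = |((l[k + 1]'(by have := pvDiffs_length l; omega)).toNat : Int)
                      - ((l[k]'(by have := pvDiffs_length l; omega)).toNat : Int)| := by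
  simp [pvDiffs, List.getElem_zipWith, List.getElem_tail]

lemma pvGetElem_idx_congr {α : Type} (l : List α) {i j : Nat} (h : i = j) (hi : i < l.length) :
    l[i]'hi = l[j]'(h ▸ hi) := by subst h; rfl

lemma pvDiffs_reverse (l : List Char) : pvDiffs l.reverse = (pvDiffs l).reverse := by
  have hl := pvDiffs_length l
  apply List.ext_getElem (by simp [pvDiffs_length])
  intro k h2 h3
  have hr : (pvDiffs l.reverse).length = l.length - 1 := by
    simpa using pvDiffs_length l.reverse
  rw [pvDiffs_getElem, List.getElem_reverse, List.getElem_reverse, List.getElem_reverse,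
      pvDiffs_getElem]
  rw [pvGetElem_idx_congr l (show l.length - 1 - (k + 1) = (pvDiffs l).length - 1 - k from by omega),
      pvGetElem_idx_congr l (show l.length - 1 - k = (pvDiffs l).length - 1 - k + 1 from by omega),
      abs_sub_comm]

lemma checkLoopA_eq (cs cs1 : List Char) (idxs : List Int) :
    checkLoopA cs cs1 idxs =
      if (∀ i ∈ idxs,
          |((PySem.List.pyGetD cs i ' ').toNat : Int) - ((PySem.List.pyGetD cs (i - 1) ' ').toNat : Int)|
            = |((PySem.List.pyGetD cs1 i ' ').toNat : Int) - ((PySem.List.pyGetD cs1 (i - 1) ' ').toNat : Int)|)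
      then 1 else 0 := by
  induction idxs with
  | nil => simp [checkLoopA]
  | cons i rest ih =>
    simp only [checkLoopA, ih, List.forall_mem_cons]
    by_cases hi :
        |((PySem.List.pyGetD cs i ' ').toNat : Int) - ((PySem.List.pyGetD cs (i - 1) ' ').toNat : Int)|
          = |((PySem.List.pyGetD cs1 i ' ').toNat : Int) - ((PySem.List.pyGetD cs1 (i - 1) ' ').toNat : Int)|
    · simp [hi]
    · simp [hi]

lemma pvCond_elem (cs : List Char) (i : Int) (h1 : 1 ≤ i) (h2 : i < (cs.length : Int)) :
    |((PySem.List.pyGetD cs i ' ').toNat : Int) - ((PySem.List.pyGetD cs (i - 1) ' ').toNat : Int)|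
      = (pvDiffs cs)[i.toNat - 1]'(by have := pvDiffs_length cs; omega) := by
  rw [PySem.List.pyGetD_eq_getElem _ _ (by omega) h2,
      PySem.List.pyGetD_eq_getElem _ _ (by omega) (by omega),
      pvDiffs_getElem,
      pvGetElem_idx_congr cs (show i.toNat = i.toNat - 1 + 1 from by omega),
      pvGetElem_idx_congr cs (show (i - 1).toNat = i.toNat - 1 from by omega)]

lemma check_cond_iff (cs : List Char) :
    (∀ i ∈ PySem.List.pyRange 1 (cs.length : Int) 1,
        |((PySem.List.pyGetD cs i ' ').toNat : Int) - ((PySem.List.pyGetD cs (i - 1) ' ').toNat : Int)|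
          = |((PySem.List.pyGetD cs.reverse i ' ').toNat : Int) - ((PySem.List.pyGetD cs.reverse (i - 1) ' ').toNat : Int)|)
    ↔ pvDiffs cs = (pvDiffs cs).reverse := by
  have hl := pvDiffs_length cs
  rw [← pvDiffs_reverse]
  constructor
  · intro h
    apply List.ext_getElem (by simp [pvDiffs_length])
    intro k hk1 hk2
    have hi := h ((k : Int) + 1) (by
      rw [PySem.List.mem_pyRange_one]
      constructor
      · omega
      · omega)
    rw [pvCond_elem cs _ (by omega) (by omega)] at hi
    rw [show |((PySem.List.pyGetD cs.reverse ((k : Int) + 1) ' ').toNat : Int)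
            - ((PySem.List.pyGetD cs.reverse ((k : Int) + 1 - 1) ' ').toNat : Int)|
          = (pvDiffs cs.reverse)[((k : Int) + 1).toNat - 1]'(by
              have := pvDiffs_length cs.reverse; simp at this ⊢; omega) from
        pvCond_elem cs.reverse _ (by omega) (by simp; omega)] at hi
    have ek : ((k : Int) + 1).toNat - 1 = k := by omega
    rw [pvGetElem_idx_congr _ ek, pvGetElem_idx_congr _ ek] at hi
    exact hi
  · intro h i hi
    rw [PySem.List.mem_pyRange_one] at hi
    rw [pvCond_elem cs i hi.1 hi.2,
        pvCond_elem cs.reverse i hi.1 (by simpa using hi.2)]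
    simp only [← h]

-- B's loop, characterised: with the invariant j = n - 1 - k it tests the outer-half pairs
lemma checkLoopB_eq (cs : List Char) (k : Nat) :
    checkLoopB cs (k : Int) ((cs.length : Int) - 1 - k) =
      if (∀ t < cs.length, k ≤ t → 2 * t + 2 < cs.length →
            (pvDiffs cs)[t]? = (pvDiffs cs)[cs.length - 2 - t]?) then 1 else 0 := by
  rw [checkLoopB]
  by_cases h : (k : Int) + 1 < (cs.length : Int) - 1 - k
  · have hm := pvDiffs_length cs
    have hn : 2 * k + 2 < cs.length := by omega
    have e1 : |((PySem.List.pyGetD cs ((k : Int) + 1) ' ').toNat : Int)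
              - ((PySem.List.pyGetD cs ((k : Int) + 1 - 1) ' ').toNat : Int)|
        = (pvDiffs cs)[k]'(by omega) := by
      rw [pvCond_elem cs _ (by omega) (by omega)]
      exact pvGetElem_idx_congr _ (by omega) _
    have e2 : |((PySem.List.pyGetD cs ((cs.length : Int) - 1 - k) ' ').toNat : Int)
              - ((PySem.List.pyGetD cs ((cs.length : Int) - 1 - k - 1) ' ').toNat : Int)|
        = (pvDiffs cs)[cs.length - 2 - k]'(by omega) := by
      rw [pvCond_elem cs _ (by omega) (by omega)]
      exact pvGetElem_idx_congr _ (by omega) _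
    have hcast : ((k : Int) + 1) = ((k + 1 : Nat) : Int) := by push_cast; ring
    have hcast2 : (cs.length : Int) - 1 - k - 1 = (cs.length : Int) - 1 - (k + 1 : Nat) := by
      push_cast; ring
    rw [dif_pos h]
    by_cases hk : (pvDiffs cs)[k]'(by omega) = (pvDiffs cs)[cs.length - 2 - k]'(by omega)
    · rw [show ((k : Int) + 1 - 1) = (k : Int) from by ring] at e1
      rw [e1, e2, if_neg (by simpa using hk), hcast, hcast2, checkLoopB_eq cs (k + 1)]
      -- the remaining condition for k equals the one for k+1 given d[k] = d[n-2-k]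
      congr 1
      apply propext
      constructor
      · intro hrest t htn ht1 ht2
        rcases Nat.eq_or_lt_of_le ht1 with he | hlt
        · subst he
          rw [List.getElem?_eq_getElem (by omega), List.getElem?_eq_getElem (by omega), hk]
        · exact hrest t htn hlt ht2
      · intro hrest t htn ht1 ht2
        exact hrest t htn (by omega) ht2
    · rw [show ((k : Int) + 1 - 1) = (k : Int) from by ring] at e1
      rw [e1, e2, if_pos (by simpa using hk)]
      rw [if_neg]
      intro hall
      apply hk
      have := hall k (by omega) (le_refl k) hn
      rw [List.getElem?_eq_getElem (by omega), List.getElem?_eq_getElem (by omega)] at this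
      exact Option.some.inj this
  · rw [dif_neg h, if_pos]
    intro t htn ht1 ht2
    omega
termination_by cs.length - 2 * k
decreasing_by omega

-- the half-check at k = 0 is exactly the palindrome property of the diff list
lemma half_iff_palindrome (cs : List Char) :
    (∀ t < cs.length, 0 ≤ t → 2 * t + 2 < cs.length →
        (pvDiffs cs)[t]? = (pvDiffs cs)[cs.length - 2 - t]?)
    ↔ pvDiffs cs = (pvDiffs cs).reverse := by
  have hm := pvDiffs_length cs
  constructor
  · intro h
    apply List.ext_getElem (by simp)
    intro k hk1 hk2
    rcases lt_trichotomy (2 * k) ((pvDiffs cs).length - 1) with hc | hc | hc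
    · have := h k (by omega) (by omega) (by omega)
      rw [List.getElem?_eq_getElem hk1,
          List.getElem?_eq_getElem (by omega)] at this
      rw [List.getElem_reverse]
      rw [pvGetElem_idx_congr _ (show (pvDiffs cs).length - 1 - k = cs.length - 2 - k from by omega)]
      exact Option.some.inj this
    · rw [List.getElem_reverse, pvGetElem_idx_congr _ (show (pvDiffs cs).length - 1 - k = k from by omega)]
    · set t := (pvDiffs cs).length - 1 - k with ht
      have := h t (by omega) (by omega) (by omega)
      rw [List.getElem?_eq_getElem (by omega), List.getElem?_eq_getElem (by omega)] at this
      rw [List.getElem_reverse]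
      have e : cs.length - 2 - t = k := by omega
      rw [pvGetElem_idx_congr _ e] at this
      exact (Option.some.inj this).symm
  · intro h t htn _ ht2
    rw [show (pvDiffs cs)[t]? = (pvDiffs cs).reverse[t]? from by rw [← h],
        List.getElem?_reverse (by omega),
        show (pvDiffs cs).length - 1 - t = cs.length - 2 - t from by omega]

-- ===== VERDICT (by name: the statement is the Claim_ definition above) =====
theorem check_spec : Claim_equal_check := by
  intro s _
  unfold Spec_check check check_alt
  simp only [PySem.List.slice?_none_none_neg_one, Option.getD_some]
  rw [checkLoopA_eq, if_congr (check_cond_iff s.toList) rfl rfl]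
  have h0 := checkLoopB_eq s.toList 0
  simp only [Nat.cast_zero, sub_zero] at h0
  rw [h0, if_congr (half_iff_palindrome s.toList) rfl rfl]
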